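-- pv_equiv track=rewrite | github.com/Gokulancv10/CodeBytes | 1-Week_Strings/Vacuum Cleaner Route.py | solution
-- ===== SOURCE A (Python) =====
-- def solution(s:str):
--
-- 	res = 0
-- 	for i in s:
-- 		if i=='L' or i =='U':
-- 			res+=1
-- 		else:
-- 			res-=1
--
-- 	if res!=0:
-- 		return False
-- 	else:
-- 		return True
-- ===== SOURCE B (Python) =====
-- def solution(s: str):
--     return 2 * (s.count('L') + s.count('U')) == len(s)
-- ===== Notes on version B (the rewrite author's own statement) =====
-- stated objective: simpler
-- what changed: Replaced the explicit loop with a +/-1 accumulator and final if/else by a loop-free arithmetic check that twice the count of L/U characters (via str.count) equals the string length.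
import Mathlib
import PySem

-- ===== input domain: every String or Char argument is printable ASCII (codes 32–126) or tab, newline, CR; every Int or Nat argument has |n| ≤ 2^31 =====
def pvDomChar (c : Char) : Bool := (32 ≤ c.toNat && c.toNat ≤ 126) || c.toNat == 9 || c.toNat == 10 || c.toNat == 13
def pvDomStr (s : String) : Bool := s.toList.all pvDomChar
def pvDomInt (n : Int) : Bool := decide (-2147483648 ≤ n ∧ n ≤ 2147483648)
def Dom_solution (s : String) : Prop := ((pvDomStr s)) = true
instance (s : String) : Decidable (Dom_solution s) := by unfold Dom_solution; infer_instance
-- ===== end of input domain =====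

-- B replaces A's explicit ±1-accumulator loop by a loop-free arithmetic check on counts (objective: simpler).

-- ===== PORT A =====
def solution (s : String) : Bool :=
  let res : Int := s.toList.foldl (fun res i => if i == 'L' || i == 'U' then res + 1 else res - 1) 0
  if res ≠ 0 then false else true

-- ===== PORT B =====
def solution_alt (s : String) : Bool :=
  2 * ((PySem.Str.count s "L" : Int) + (PySem.Str.count s "U" : Int)) == (PySem.Str.len s : Int)

-- ===== PRECONDITION & SPEC =====
def Spec_solution (s : String) (out : Bool) : Prop := out = solution_alt s
instance (s : String) (out : Bool) : Decidable (Spec_solution s out) := by unfold Spec_solution; infer_instance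

-- ===== CLAIM (what is proved, stated in full; the proofs are below) =====
def Claim_equal_solution : Prop := ∀ (s : String), Dom_solution s → Spec_solution s (solution s)

-- ===== LEMMAS AND PROOFS =====

-- the ±1 fold equals 2·(count L + count U) − length
theorem pvFold_eq (l : List Char) (a : Int) :
    l.foldl (fun res i => if i == 'L' || i == 'U' then res + 1 else res - 1) a
      = a + 2 * ((l.count 'L' : Int) + (l.count 'U' : Int)) - l.length := by
  induction l generalizing a with
  | nil => simp
  | cons x xs ih =>
    simp only [List.foldl_cons, ih, List.count_cons, List.length_cons]
    by_cases hL : x = 'L' <;> by_cases hU : x = 'U' <;> simp [hL, hU] <;> ring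

theorem pvCountGo_singleton (c : Char) (fuel : Nat) (l : List Char) (acc : Nat)
    (h : l.length ≤ fuel) :
    PySem.Chars.count.go [c] fuel l acc = acc + l.count c := by
  induction fuel generalizing l acc with
  | zero => cases l with
    | nil => simp [PySem.Chars.count.go]
    | cons x xs => simp at h
  | succ n ih =>
    cases l with
    | nil => simp [PySem.Chars.count.go]
    | cons x xs =>
      simp only [List.length_cons] at h
      by_cases hx : x = c
      · simp [PySem.Chars.count.go, hx, List.isPrefixOf, ih xs (acc + 1) (by omega)]
        omega
      · have : ¬ List.isPrefixOf [c] (x :: xs) = true := by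
          simp [List.isPrefixOf]; intro hc; exact absurd (hc) (by simpa [eq_comm] using hx)
        simp [PySem.Chars.count.go, this, ih xs acc (by omega), hx]

-- single-char substring count is the element count
theorem pvCharsCount_singleton (l : List Char) (c : Char) :
    PySem.Chars.count l [c] = l.count c := by
  simp [PySem.Chars.count, pvCountGo_singleton c l.length l 0 le_rfl]

-- ===== VERDICT (by name: the statement is the Claim_ definition above) =====
theorem solution_spec : Claim_equal_solution := by
  intro s _
  unfold Spec_solution solution solution_alt
  simp only [PySem.Str.count_eq, PySem.Str.len_eq, pvFold_eq]
  rw [show ("L".toList) = ['L'] from rfl, show ("U".toList) = ['U'] from rfl,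
    pvCharsCount_singleton, pvCharsCount_singleton]
  simp only [ne_eq, zero_add]
  split_ifs with h <;> symm <;> simp only [beq_iff_eq, beq_eq_false_iff_ne, ne_eq] <;> omega
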